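-- pv_equiv track=rewrite | github.com/CodeFramework-Tech/IR-repo | src/boolean_index.py | boolean_retrieve
-- ===== SOURCE A (Python) =====
-- def boolean_retrieve(query_tokens, index):
--     """
--     Simple AND boolean retrieval.
--     Returns a set of doc_ids that contain ALL query tokens.
--     """
--     posting_lists = []
--     for token in query_tokens:
--         if token in index:
--             posting_lists.append(set(index[token]))
--         else:
--             posting_lists.append(set())
--
--     if not posting_lists:
--         return set()
--
--     return set.intersection(*posting_lists)
-- ===== SOURCE B (Python) =====
-- def boolean_retrieve(query_tokens, index):
--     """
--     AND boolean retrieval, term-at-a-time: count, per doc, how many of the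
--     distinct query tokens it occurs in; keep docs whose count equals the
--     number of distinct query tokens.
--     """
--     distinct = list(dict.fromkeys(query_tokens))
--     if not distinct:
--         return set()
--     for t in distinct:
--         if t not in index:
--             return set()
--     counts = {}
--     for t in distinct:
--         for d in dict.fromkeys(index[t]):
--             counts[d] = counts.get(d, 0) + 1
--     need = len(distinct)
--     return {d for d in counts if counts[d] == need}
-- ===== Notes on version B (the rewrite author's own statement) =====
-- stated objective: faster
-- what changed: Replaces A's build-a-posting-set-per-token-then-intersect-all with term-at-a-time accumulation: deduplicate the query tokens, return empty early if the query is empty or a token is missing, then count per doc id in how many distinct tokens' posting sets it occurs and keep the docs whose count equals the number of distinct tokens.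
import Mathlib
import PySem

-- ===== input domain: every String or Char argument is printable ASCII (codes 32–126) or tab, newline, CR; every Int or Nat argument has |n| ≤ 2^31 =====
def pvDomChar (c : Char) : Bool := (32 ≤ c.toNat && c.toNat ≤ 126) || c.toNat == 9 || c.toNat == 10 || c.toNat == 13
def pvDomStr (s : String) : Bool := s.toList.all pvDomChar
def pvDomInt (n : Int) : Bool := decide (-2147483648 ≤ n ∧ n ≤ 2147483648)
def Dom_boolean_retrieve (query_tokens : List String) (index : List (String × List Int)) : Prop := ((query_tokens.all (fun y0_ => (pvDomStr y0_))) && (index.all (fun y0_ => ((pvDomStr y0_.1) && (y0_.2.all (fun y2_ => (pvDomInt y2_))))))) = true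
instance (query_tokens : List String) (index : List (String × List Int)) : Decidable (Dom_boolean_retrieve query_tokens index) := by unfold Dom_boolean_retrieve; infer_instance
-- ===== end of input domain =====

-- B replaces A's build-all-posting-sets-then-intersect with term-at-a-time count
-- accumulation over the distinct query tokens (alternative decomposition, same cost class).
-- Return value only: neither version mutates its arguments.

-- ===== PORT A =====
-- A: collect one posting set per query token (empty set for a missing token),
-- then intersect them all; empty query returns the empty set.
def boolean_retrieve (query_tokens : List String) (index : List (String × List Int)) : List Int :=
  let posting_lists : List (PySem.Set Int) :=
    query_tokens.foldl (fun acc token =>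
      match index.lookup token with      -- 'token in index' / 'index[token]' (first match)
      | some ds => acc ++ [PySem.Set.ofList ds]
      | none    => acc ++ [PySem.Set.empty]) []
  match posting_lists with
  | [] => []
  | p :: rest => rest.foldl PySem.Set.inter p

-- ===== PORT B =====
-- B: distinct tokens; empty query or a missing token → empty set; otherwise count,
-- per doc id, in how many distinct tokens' posting sets it occurs; keep full counts.
def boolean_retrieve_alt (query_tokens : List String) (index : List (String × List Int)) : List Int :=
  let distinct := PySem.List.dedup query_tokens          -- list(dict.fromkeys(query_tokens))
  if distinct = [] then []
  else if distinct.any (fun t => (index.lookup t).isNone) then []   -- 'for t…: if t not in index: return set()'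
  else
    let counts : PySem.Dict Int Int :=
      distinct.foldl (fun cnt t =>
        (PySem.List.dedup ((index.lookup t).getD [])).foldl
          (fun cnt d => cnt.insert d (cnt.getD d 0 + 1)) cnt) PySem.Dict.empty
    let need : Int := distinct.length
    counts.keys.filter (fun d => counts.getD d 0 == need)

-- ===== PRECONDITION & SPEC =====
def Spec_boolean_retrieve (query_tokens : List String) (index : List (String × List Int)) (out : List Int) : Prop := out = boolean_retrieve_alt query_tokens index
instance (query_tokens : List String) (index : List (String × List Int)) (out : List Int) : Decidable (Spec_boolean_retrieve query_tokens index out) := by unfold Spec_boolean_retrieve; infer_instance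

-- ===== CLAIM (what is proved, stated in full; the proofs are below) =====
def Claim_equal_boolean_retrieve : Prop := ∀ (query_tokens : List String) (index : List (String × List Int)), Dom_boolean_retrieve query_tokens index → Spec_boolean_retrieve query_tokens index (boolean_retrieve query_tokens index)

-- ===== LEMMAS AND PROOFS =====

-- the posting set of token t (empty if t is missing from the index)
def pset (index : List (String × List Int)) (t : String) : PySem.Set Int :=
  PySem.Set.ofList ((index.lookup t).getD [])

theorem pset_of_none {index : List (String × List Int)} {t : String}
    (h : index.lookup t = none) : pset index t = [] := by
  simp [pset, h, PySem.Set.ofList]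

-- A's posting-list loop is a map
theorem postings_eq_map (query_tokens : List String) (index : List (String × List Int)) :
    query_tokens.foldl (fun acc token =>
      match index.lookup token with
      | some ds => acc ++ [PySem.Set.ofList ds]
      | none    => acc ++ [PySem.Set.empty]) [] = query_tokens.map (pset index) := by
  have : ∀ (acc : List (PySem.Set Int)),
      query_tokens.foldl (fun acc token =>
        match index.lookup token with
        | some ds => acc ++ [PySem.Set.ofList ds]
        | none    => acc ++ [PySem.Set.empty]) acc = acc ++ query_tokens.map (pset index) := by
    induction query_tokens with
    | nil => simp
    | cons t ts ih =>
        intro acc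
        cases h : index.lookup t with
        | none =>
            simp only [List.foldl_cons, h]
            rw [ih]
            simp [pset, h, PySem.Set.empty, PySem.Set.ofList]
        | some ds =>
            simp only [List.foldl_cons, h]
            rw [ih]
            simp [pset, h]
  simpa using this []

-- folding intersection = filtering by membership in every set
theorem foldl_inter_eq_filter (ps : List (PySem.Set Int)) (p : List Int) :
    ps.foldl PySem.Set.inter p = p.filter (fun d => ps.all (fun s => PySem.Set.contains s d)) := by
  induction ps generalizing p with
  | nil => simp
  | cons s ps ih =>
      simp only [List.foldl_cons, ih, PySem.Set.inter, List.filter_filter]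
      apply List.filter_congr
      intro d _
      simp [Bool.and_comm]

-- a nested count loop is the count loop over the flattened list
theorem foldl_foldl_eq_foldl_flatMap {α β γ : Type} (l : List α) (f : α → List β)
    (g : γ → β → γ) (init : γ) :
    l.foldl (fun acc a => (f a).foldl g acc) init = (l.flatMap f).foldl g init := by
  induction l generalizing init with
  | nil => simp
  | cons a l ih => simp [List.flatMap_cons, List.foldl_append, ih]

-- counting occurrences across the distinct tokens' posting sets
theorem count_flatMap_pset (index : List (String × List Int)) (ts : List String) (d : Int) :
    (ts.flatMap (pset index)).count d = ts.countP (fun t => PySem.Set.contains (pset index t) d) := by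
  induction ts with
  | nil => simp
  | cons t ts ih =>
      rw [List.flatMap_cons, List.count_append, ih]
      by_cases hm : d ∈ pset index t
      · rw [List.countP_cons_of_pos]
        · have := PySem.Set.nodup_ofList (α := Int) (((index.lookup t).getD []))
          have h1 : (pset index t).count d = 1 := by
            exact List.count_eq_one_of_mem this hm
          omega
        · simpa [PySem.Set.contains_iff] using hm
      · rw [List.countP_cons_of_neg]
        · simp [List.count_eq_zero_of_not_mem hm]
        · simpa [PySem.Set.contains_iff] using hm

-- count-equals-length test = "occurs in every distinct token's set"
theorem count_cond_eq_all (ts : List String) (index : List (String × List Int)) (d : Int) :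
    (((ts.flatMap (pset index)).count d : Int) == (ts.length : Int))
      = ts.all (fun t => PySem.Set.contains (pset index t) d) := by
  rw [Bool.eq_iff_iff]
  rw [count_flatMap_pset]
  simp only [beq_iff_eq, Nat.cast_inj, List.all_eq_true, List.countP_eq_length]

-- membership in the two token lists coincides, so the two 'all' tests agree
theorem all_distinct_eq_all_tail (t0 : String) (qs : List String)
    (index : List (String × List Int)) (d : Int) (hd : d ∈ pset index t0) :
    (t0 :: PySem.Set.discard (PySem.Set.ofList qs) t0).all
        (fun t => PySem.Set.contains (pset index t) d)
      = qs.all (fun t => PySem.Set.contains (pset index t) d) := by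
  rw [Bool.eq_iff_iff]
  simp only [List.all_cons, Bool.and_eq_true, List.all_eq_true]
  constructor
  · rintro ⟨h0, h⟩ t ht
    by_cases he : t = t0
    · exact he ▸ h0
    · exact h t (by simp [PySem.Set.mem_discard, PySem.Set.mem_ofList, ht, he])
  · intro h
    refine ⟨by simpa [PySem.Set.contains_iff] using hd, ?_⟩
    intro t ht
    have : t ∈ qs := by
      have := (PySem.Set.mem_discard (s := PySem.Set.ofList qs) (x := t0) (y := t)).mp ht
      simpa [PySem.Set.mem_ofList] using this.1
    exact h t this

-- ===== VERDICT (by name: the statement is the Claim_ definition above) =====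
theorem boolean_retrieve_spec : Claim_equal_boolean_retrieve := by
  intro q i _
  unfold Spec_boolean_retrieve boolean_retrieve boolean_retrieve_alt
  rw [postings_eq_map]
  cases q with
  | nil => simp
  | cons t0 qs =>
    simp only [List.map_cons, PySem.List.dedup_eq_ofList, PySem.Set.ofList_cons,
      foldl_inter_eq_filter, List.all_map]
    rw [if_neg (by simp)]
    set D' := PySem.Set.discard (PySem.Set.ofList qs) t0 with hD'
    by_cases hmiss : (t0 :: D').any (fun t => (i.lookup t).isNone)
    · -- some needed token is missing: both sides are the empty set
      rw [if_pos hmiss]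
      obtain ⟨t, ht, hnone⟩ := List.any_eq_true.mp hmiss
      have hpt : pset i t = [] := pset_of_none (by simpa using hnone)
      rcases List.mem_cons.mp ht with ht | ht
      · rw [ht] at hpt; simp [hpt]
      · have htqs : t ∈ qs := by
          have := (PySem.Set.mem_discard (s := PySem.Set.ofList qs) (x := t0) (y := t)).mp ht
          simpa [PySem.Set.mem_ofList] using this.1
        rw [List.filter_eq_nil_iff.mpr]
        intro d _
        simp only [List.all_eq_true]
        intro hall
        have := hall t htqs
        simp [hpt, PySem.Set.contains] at this
    · rw [if_neg hmiss]
      -- the nested counting loop is a Counter over the flattened posting sets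
      rw [foldl_foldl_eq_foldl_flatMap
            (f := fun t => PySem.Set.ofList ((i.lookup t).getD []))]
      rw [PySem.Dict.foldl_insert_getD_add_one_eq_counter]
      rw [PySem.Dict.keys_counter]
      have hflat : (t0 :: D').flatMap (fun t => PySem.Set.ofList ((i.lookup t).getD []))
          = (t0 :: D').flatMap (pset i) := rfl
      rw [hflat]
      have hfilt : ∀ d : Int,
          ((PySem.Dict.counter ((t0 :: D').flatMap (pset i))).getD d 0
              == ((t0 :: D').length : Int))
            = (t0 :: D').all (fun t => PySem.Set.contains (pset i t) d) := by
        intro d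
        rw [PySem.Dict.getD_counter, count_cond_eq_all]
      rw [List.filter_congr (fun d _ => hfilt d)]
      -- restrict the filter from all counted docs to the first token's posting set
      rw [List.flatMap_cons]
      rw [PySem.Set.ofList_append]
      have hnd : (pset i t0).Nodup := PySem.Set.nodup_ofList _
      rw [PySem.Set.ofList_eq_self_of_nodup _ hnd,
          PySem.Set.update_eq_append_filter, List.filter_append, List.filter_filter]
      have hdead : ∀ d ∈ PySem.Set.ofList (D'.flatMap (pset i)),
          ¬ (((t0 :: D').all (fun t => PySem.Set.contains (pset i t) d)) &&
             (!PySem.Set.contains (pset i t0) d)) = true := by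
        intro d _ hcontra
        simp only [Bool.and_eq_true, Bool.not_eq_true', List.all_cons] at hcontra
        obtain ⟨⟨h0, _⟩, hnc⟩ := hcontra
        rw [h0] at hnc
        simp at hnc
      rw [List.filter_eq_nil_iff.mpr hdead, List.append_nil]
      exact List.filter_congr (fun d hd =>
        (all_distinct_eq_all_tail t0 qs i d (by simpa [pset] using hd)).symm)
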